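-- pv_equiv track=rewrite | github.com/nguyenhuyenag/algorithms | codewars_python/SumOfTwoSquares.py | decompose_helper
-- ===== SOURCE A (Python) =====
-- def decompose_helper(remain, n):
--     if remain == 0:
--         return [0]
--
--     for i in range(n, 0, -1):
--         if (remain - i ** 2) >= 0:
--             temp_result = decompose_helper(remain - i ** 2, i)
--
--             if temp_result is not None:
--                 return temp_result + [i]
--
--     return None
-- ===== SOURCE B (Python) =====
-- def decompose_helper(remain, n):
--     # Iterative greedy: A's backtracking never actually backtracks (a tail of 1's
--     # always completes any non-negative remainder), so take the largest usable
--     # square each round and reverse the picks at the end.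
--     if remain < 0:
--         return None
--     picks = []
--     while remain > 0:
--         if n <= 0:
--             return None
--         j = 0
--         while j < n and (j + 1) * (j + 1) <= remain:
--             j += 1
--         picks.append(j)
--         remain -= j * j
--         n = j
--     return [0] + picks[::-1]
-- ===== Notes on version B (the rewrite author's own statement) =====
-- stated objective: faster
-- what changed: Replaces A's descending-backtracking recursion (which never actually backtracks, since a tail of 1's always completes) with a flat iterative greedy loop whose count-up search for the largest usable square is bounded by isqrt(remain) instead of scanning down from n.
import Mathlib
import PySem

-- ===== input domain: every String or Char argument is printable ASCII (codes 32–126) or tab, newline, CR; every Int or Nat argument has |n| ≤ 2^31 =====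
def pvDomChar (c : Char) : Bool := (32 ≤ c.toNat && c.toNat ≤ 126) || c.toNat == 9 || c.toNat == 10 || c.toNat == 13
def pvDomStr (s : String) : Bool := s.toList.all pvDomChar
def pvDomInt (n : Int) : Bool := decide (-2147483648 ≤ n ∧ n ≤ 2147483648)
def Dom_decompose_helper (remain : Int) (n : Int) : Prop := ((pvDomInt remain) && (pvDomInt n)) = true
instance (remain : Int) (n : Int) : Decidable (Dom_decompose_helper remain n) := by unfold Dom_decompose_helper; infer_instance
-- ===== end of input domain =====

-- B replaces A's descending backtracking recursion with a flat iterative greedy loop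
-- (count-up search for the largest usable square, accumulator reversed at the end);
-- alternative decomposition, same results.


-- ===== PORT A =====
-- Literal port of A.  The `for i in range(n, 0, -1)` loop is `decomposeLoopF`,
-- counting down over a Nat k (the current Python loop value i is (k' : Int) + 1 = k);
-- the recursive call is the explicit `rec` argument.  `decomposeF` carries a fuel
-- (a pure totality device: each recursive call strictly decreases the non-negative
-- remainder, so fuel remain.toNat + 1 at the entry point is never exhausted).
def decomposeLoopF (rec : Int → Int → Option (List Int)) (remain : Int) : Nat → Option (List Int)
  | 0 => none
  | Nat.succ k' =>
    if 0 ≤ remain - ((k' : Int) + 1) ^ 2 then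
      match rec (remain - ((k' : Int) + 1) ^ 2) ((k' : Int) + 1) with
      | some t => some (t ++ [(k' : Int) + 1])
      | none => decomposeLoopF rec remain k'
    else decomposeLoopF rec remain k'

def decomposeF : Nat → Int → Int → Option (List Int)
  | 0, _, _ => none
  | Nat.succ fuel, remain, n =>
    if remain = 0 then some [0]
    else decomposeLoopF (decomposeF fuel) remain n.toNat

def decompose_helper (remain : Int) (n : Int) : Option (List Int) :=
  decomposeF (remain.toNat + 1) remain n

-- ===== PORT B =====
-- Port of Source B.  The inner `while j < n and (j+1)*(j+1) <= remain` loop is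
-- `altSearchF` (fuel n.toNat ≥ n - j suffices: j grows towards n); the outer
-- `while remain > 0` loop is `altLoopF` (fuel remain.toNat suffices: remain
-- strictly decreases and the loop exits at remain ≤ 0).
def altSearchF (remain : Int) (n : Int) : Nat → Int → Int
  | 0, j => j
  | Nat.succ fuel, j =>
    if j < n ∧ (j + 1) * (j + 1) ≤ remain then altSearchF remain n fuel (j + 1) else j

def altLoopF : Nat → Int → Int → List Int → Option (List Int)
  | 0, remain, _, picks => if 0 < remain then none else some (0 :: picks.reverse)
  | Nat.succ fuel, remain, n, picks =>
    if 0 < remain then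
      if n ≤ 0 then none
      else
        let j := altSearchF remain n n.toNat 0
        altLoopF fuel (remain - j * j) j (picks ++ [j])
    else some (0 :: picks.reverse)

def decompose_helper_alt (remain : Int) (n : Int) : Option (List Int) :=
  if remain < 0 then none
  else altLoopF remain.toNat remain n []

-- ===== PRECONDITION & SPEC =====
-- Pre_ excludes inputs with 0 < remain, 0 < n and remain > 900*n*n, where A's recursion
-- depth (about remain/n^2 greedy steps, measured to first exceed Python's default 1000-frame
-- limit at remain = 999, n = 1) reaches RecursionError; the 900 bound leaves only a thin
-- band below the measured limit as a margin for the caller's own stack depth.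
def Pre_decompose_helper (remain : Int) (n : Int) : Prop :=
  remain ≤ 900 * n * n ∨ remain ≤ 0 ∨ n ≤ 0
instance (remain : Int) (n : Int) : Decidable (Pre_decompose_helper remain n) := by unfold Pre_decompose_helper; infer_instance
def pvWitness_decompose_helper : Int × Int := (12, 3)

def Spec_decompose_helper (remain : Int) (n : Int) (out : Option (List Int)) : Prop := out = decompose_helper_alt remain n
instance (remain : Int) (n : Int) (out : Option (List Int)) : Decidable (Spec_decompose_helper remain n out) := by unfold Spec_decompose_helper; infer_instance

-- ===== CLAIM (what is proved, stated in full; the proofs are below) =====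
def Claim_equal_decompose_helper : Prop := ∀ (remain : Int) (n : Int), Dom_decompose_helper remain n → Pre_decompose_helper remain n → Spec_decompose_helper remain n (decompose_helper remain n)

-- ===== LEMMAS AND PROOFS =====

theorem altSearchF_ge (remain n : Int) (fuel : Nat) : ∀ j : Int, j ≤ altSearchF remain n fuel j := by
  induction fuel with
  | zero => intro j; rw [altSearchF]
  | succ fuel ih =>
    intro j
    rw [altSearchF]
    split
    · have := ih (j + 1); omega
    · omega

theorem altSearchF_sq_le (remain n : Int) (fuel : Nat) :
    ∀ j : Int, j * j ≤ remain → altSearchF remain n fuel j * altSearchF remain n fuel j ≤ remain := by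
  induction fuel with
  | zero => intro j h; rw [altSearchF]; exact h
  | succ fuel ih =>
    intro j h
    rw [altSearchF]
    split
    · next hg => exact ih (j + 1) (by nlinarith [hg.2])
    · exact h

theorem altSearchF_le (remain n : Int) (fuel : Nat) :
    ∀ j : Int, j ≤ n → altSearchF remain n fuel j ≤ n := by
  induction fuel with
  | zero => intro j h; rw [altSearchF]; exact h
  | succ fuel ih =>
    intro j h
    rw [altSearchF]
    split
    · next hg => exact ih (j + 1) (by omega)
    · exact h

theorem altSearchF_pos (remain n : Int) (fuel : Nat) (hf : 1 ≤ fuel) (hr : 0 < remain) (hn : 0 < n) :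
    1 ≤ altSearchF remain n fuel 0 := by
  obtain ⟨fuel', rfl⟩ : ∃ f', fuel = f' + 1 := ⟨fuel - 1, by omega⟩
  rw [altSearchF, if_pos (by constructor <;> omega)]
  exact altSearchF_ge remain n fuel' 1

theorem altSearchF_stop (remain n : Int) (fuel : Nat) :
    ∀ j : Int, (n - j).toNat ≤ fuel →
    ¬ (altSearchF remain n fuel j < n ∧
       (altSearchF remain n fuel j + 1) * (altSearchF remain n fuel j + 1) ≤ remain) := by
  induction fuel with
  | zero => intro j hf; rw [altSearchF]; intro hc; omega
  | succ fuel ih =>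
    intro j hf
    rw [altSearchF]
    split
    · next hg => exact ih (j + 1) (by omega)
    · next hg => exact hg

-- A's loop returns none on a negative remainder (whatever the recursive callee is).
theorem decomposeLoopF_neg (rec : Int → Int → Option (List Int)) (remain : Int) (hr : remain < 0) :
    ∀ k, decomposeLoopF rec remain k = none := by
  intro k
  induction k with
  | zero => rw [decomposeLoopF]
  | succ k' ih =>
    rw [decomposeLoopF]
    have h1 : (0 : Int) ≤ ((k' : Int) + 1) ^ 2 := by positivity
    rw [if_neg (by omega)]
    exact ih

-- With adequate fuel, altLoopF does not depend on the exact fuel value.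
theorem altLoopF_fuel (f1 : Nat) : ∀ (f2 : Nat) (remain n : Int) (picks : List Int),
    remain.toNat ≤ f1 → remain.toNat ≤ f2 → altLoopF f1 remain n picks = altLoopF f2 remain n picks := by
  induction f1 with
  | zero =>
    intro f2 remain n picks h1 h2
    cases f2 with
    | zero => rfl
    | succ f2 => rw [altLoopF, altLoopF, if_neg (by omega), if_neg (by omega)]
  | succ f1 ih =>
    intro f2 remain n picks h1 h2
    by_cases hr : 0 < remain
    · cases f2 with
      | zero => omega
      | succ f2 =>
        rw [altLoopF, altLoopF, if_pos hr, if_pos hr]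
        by_cases hn : n ≤ 0
        · rw [if_pos hn, if_pos hn]
        · rw [if_neg hn, if_neg hn]
          have hj1 : (1 : Int) ≤ altSearchF remain n n.toNat 0 :=
            altSearchF_pos remain n n.toNat (by omega) hr (by omega)
          have hj2 : altSearchF remain n n.toNat 0 * altSearchF remain n n.toNat 0 ≤ remain :=
            altSearchF_sq_le remain n n.toNat 0 (by nlinarith)
          have hc : (1 : Int) ≤ altSearchF remain n n.toNat 0 * altSearchF remain n n.toNat 0 := by nlinarith
          exact ih f2 _ _ _ (by omega) (by omega)
    · cases f2 with
      | zero => rw [altLoopF, altLoopF, if_neg hr, if_neg hr]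
      | succ f2 => rw [altLoopF, altLoopF, if_neg hr, if_neg hr]

-- Accumulator lemma for altLoopF.
theorem altLoopF_acc (fuel : Nat) : ∀ (remain n : Int) (picks : List Int),
    altLoopF fuel remain n picks = (altLoopF fuel remain n []).map (· ++ picks.reverse) := by
  induction fuel with
  | zero =>
    intro remain n picks
    rw [altLoopF, altLoopF]
    split
    · rfl
    · simp
  | succ fuel ih =>
    intro remain n picks
    by_cases hr : 0 < remain
    · rw [altLoopF, altLoopF, if_pos hr, if_pos hr]
      by_cases hn : n ≤ 0
      · rw [if_pos hn, if_pos hn]; rfl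
      · rw [if_neg hn, if_neg hn]
        show altLoopF fuel _ _ (picks ++ [altSearchF remain n n.toNat 0]) =
          Option.map _ (altLoopF fuel _ _ ([] ++ [altSearchF remain n n.toNat 0]))
        rw [ih _ _ (picks ++ [altSearchF remain n n.toNat 0]),
            ih _ _ ([] ++ [altSearchF remain n n.toNat 0])]
        cases altLoopF fuel (remain - altSearchF remain n n.toNat 0 * altSearchF remain n n.toNat 0)
          (altSearchF remain n n.toNat 0) [] with
        | none => rfl
        | some l => simp
    · rw [altLoopF, altLoopF, if_neg hr, if_neg hr]
      simp

-- altLoopF returns some whenever remain ≥ 0, (remain > 0 → n ≥ 1) and the fuel is adequate.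
theorem altLoopF_some (fuel : Nat) : ∀ (remain n : Int) (picks : List Int), remain.toNat ≤ fuel →
    0 ≤ remain → (0 < remain → 1 ≤ n) → ∃ l, altLoopF fuel remain n picks = some l := by
  induction fuel with
  | zero =>
    intro remain n picks hf h0 _
    rw [altLoopF, if_neg (by omega)]
    exact ⟨_, rfl⟩
  | succ fuel ih =>
    intro remain n picks hf h0 h1
    by_cases hr : 0 < remain
    · rw [altLoopF, if_pos hr, if_neg (by have := h1 hr; omega)]
      have hj1 : (1 : Int) ≤ altSearchF remain n n.toNat 0 :=
        altSearchF_pos remain n n.toNat (by have := h1 hr; omega) hr (by have := h1 hr; omega)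
      have hj2 : altSearchF remain n n.toNat 0 * altSearchF remain n n.toNat 0 ≤ remain :=
        altSearchF_sq_le remain n n.toNat 0 (by nlinarith)
      have hc : (1 : Int) ≤ altSearchF remain n n.toNat 0 * altSearchF remain n n.toNat 0 := by nlinarith
      exact ih _ _ _ (by omega) (by omega) (fun _ => hj1)
    · rw [altLoopF, if_neg hr]
      exact ⟨_, rfl⟩

-- Main equivalence: with adequate fuel, A's recursion equals B.
theorem main_eq (fuel : Nat) : ∀ (remain n : Int), remain.toNat < fuel →
    decomposeF fuel remain n = decompose_helper_alt remain n := by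
  induction fuel with
  | zero => intro remain n h; omega
  | succ fuel ih =>
    intro remain n hf
    by_cases h0 : remain = 0
    · subst h0
      rw [decomposeF, if_pos rfl, decompose_helper_alt, if_neg (by omega)]
      rfl
    by_cases hneg : remain < 0
    · rw [decomposeF, if_neg h0, decompose_helper_alt, if_pos hneg]
      exact decomposeLoopF_neg _ remain hneg _
    have hr : 0 < remain := by omega
    obtain ⟨f', hf'⟩ : ∃ f', remain.toNat = f' + 1 := ⟨remain.toNat - 1, by omega⟩
    rw [decomposeF, if_neg h0, decompose_helper_alt, if_neg (by omega), hf']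
    by_cases hn : n ≤ 0
    · have hnn : n.toNat = 0 := by omega
      rw [hnn, decomposeLoopF, altLoopF, if_pos hr, if_pos hn]
    -- main case: remain > 0, n ≥ 1
    have hn1 : (1 : Int) ≤ n := by omega
    set m : Int := altSearchF remain n n.toNat 0 with hm
    have hm1 : (1 : Int) ≤ m := altSearchF_pos remain n n.toNat (by omega) hr (by omega)
    have hmsq : m * m ≤ remain := altSearchF_sq_le remain n n.toNat 0 (by nlinarith)
    have hmn : m ≤ n := altSearchF_le remain n n.toNat 0 (by omega)
    have hstop := altSearchF_stop remain n n.toNat 0 (by omega)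
    rw [← hm] at hstop
    have hc : (1 : Int) ≤ m * m := by nlinarith
    -- the programs agree at the recursive input (remain - m*m, m), and B returns some there
    have hrec : decomposeF fuel (remain - m * m) m = decompose_helper_alt (remain - m * m) m :=
      ih _ _ (by omega)
    have hsome : ∃ t, decompose_helper_alt (remain - m * m) m = some t := by
      have h := altLoopF_some (remain - m * m).toNat (remain - m * m) m [] le_rfl (by omega)
        (fun _ => hm1)
      rw [decompose_helper_alt, if_neg (by omega)]
      exact h
    obtain ⟨t, ht⟩ := hsome
    -- A side: the countdown loop fires at i = m …
    have hp : m ^ 2 = m * m := pow_two m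
    have hAm : decomposeLoopF (decomposeF fuel) remain m.toNat = some (t ++ [m]) := by
      have hmk : m.toNat = (m.toNat - 1) + 1 := by omega
      rw [hmk, decomposeLoopF]
      have hcast : ((m.toNat - 1 : Nat) : Int) + 1 = m := by omega
      rw [hcast, if_pos (by simp only [hp]; omega), hp, hrec, ht]
    -- … after skipping every i with m < i ≤ n (whose square exceeds remain)
    have hskip : ∀ k, m.toNat ≤ k → k ≤ n.toNat →
        decomposeLoopF (decomposeF fuel) remain k = some (t ++ [m]) := by
      intro k
      induction k with
      | zero => intro h1 h2; omega
      | succ k' ihk =>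
        intro hk1 hk2
        by_cases hkm : k' + 1 = m.toNat
        · rw [← hkm] at hAm; exact hAm
        · have hgt : m < (k' : Int) + 1 := by omega
          have hmn' : m < n := by omega
          have hfail : remain < (m + 1) * (m + 1) := by
            rcases not_and_or.mp hstop with h | h
            · exact absurd hmn' h
            · omega
          rw [decomposeLoopF]
          have hbig : ¬ (0 : Int) ≤ remain - ((k' : Int) + 1) ^ 2 := by
            have h1 : (m + 1) * (m + 1) ≤ ((k' : Int) + 1) * ((k' : Int) + 1) := by nlinarith
            have h2 : ((k' : Int) + 1) ^ 2 = ((k' : Int) + 1) * ((k' : Int) + 1) := pow_two _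
            omega
          rw [if_neg hbig]
          exact ihk (by omega) (by omega)
    rw [hskip n.toNat (by omega) le_rfl]
    -- B side: one unfolding, fuel adjustment, then the accumulator lemma
    rw [altLoopF, if_pos hr, if_neg hn, ← hm]
    show some (t ++ [m]) = altLoopF f' (remain - m * m) m ([] ++ [m])
    rw [altLoopF_fuel f' (remain - m * m).toNat (remain - m * m) m ([] ++ [m]) (by omega) le_rfl]
    rw [altLoopF_acc (remain - m * m).toNat (remain - m * m) m ([] ++ [m])]
    have halt : altLoopF (remain - m * m).toNat (remain - m * m) m [] = some t := by
      rw [decompose_helper_alt, if_neg (by omega)] at ht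
      exact ht
    rw [halt]
    simp

-- ===== VERDICT (by name: the statement is the Claim_ definition above) =====
theorem decompose_helper_spec : Claim_equal_decompose_helper := by
  intro remain n hdom hpre
  unfold Spec_decompose_helper decompose_helper
  exact main_eq (remain.toNat + 1) remain n (by omega)
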